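-- pv_equiv track=rewrite | github.com/weiying-chen/highlight | highlight_source_terms.py | _split_nonempty_blocks
-- ===== SOURCE A (Python) =====
-- def _split_nonempty_blocks(lines: list[str]) -> list[list[str]]:
--     blocks: list[list[str]] = []
--     current: list[str] = []
--     for line in lines:
--         if line.strip():
--             current.append(line)
--             continue
--         if current:
--             blocks.append(current)
--             current = []
--     if current:
--         blocks.append(current)
--     return blocks
-- ===== SOURCE B (Python) =====
-- from itertools import groupby
--
-- def _split_nonempty_blocks(lines: list[str]) -> list[list[str]]:
--     return [list(g) for k, g in groupby(lines, key=lambda l: bool(l.strip())) if k]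
-- ===== Notes on version B (the rewrite author's own statement) =====
-- stated objective: idiomatic
-- what changed: Replaces the explicit blocks/current buffer-and-flush loop with itertools.groupby keyed on blank-line truthiness followed by a comprehension keeping the non-blank groups.
import Mathlib
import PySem

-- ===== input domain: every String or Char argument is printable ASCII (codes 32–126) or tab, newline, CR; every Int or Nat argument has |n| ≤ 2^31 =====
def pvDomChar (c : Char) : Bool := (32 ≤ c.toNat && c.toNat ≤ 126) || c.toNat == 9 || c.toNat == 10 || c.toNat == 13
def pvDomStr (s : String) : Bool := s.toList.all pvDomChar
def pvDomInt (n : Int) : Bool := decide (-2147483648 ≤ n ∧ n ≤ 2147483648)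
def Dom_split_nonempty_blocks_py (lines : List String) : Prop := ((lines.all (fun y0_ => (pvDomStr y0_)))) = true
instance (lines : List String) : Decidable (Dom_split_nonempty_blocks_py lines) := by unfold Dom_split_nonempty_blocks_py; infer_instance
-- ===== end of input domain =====

-- B replaces A's explicit buffer-and-flush loop with groupby-on-blankness plus a filter keeping the non-blank groups (idiomatic; same cost).

-- truthiness of line.strip()
def pvKey (l : String) : Bool := PySem.Str.strip l != ""

-- ===== PORT A =====
-- the for-loop over lines with state (blocks, current)
def pvLoopA : List String → List (List String) → List String → List (List String)
  | [], blocks, current => if current = [] then blocks else blocks ++ [current]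
  | l :: ls, blocks, current =>
      if pvKey l then pvLoopA ls blocks (current ++ [l])
      else if current = [] then pvLoopA ls blocks []
      else pvLoopA ls (blocks ++ [current]) []

def split_nonempty_blocks_py (lines : List String) : List (List String) :=
  pvLoopA lines [] []

-- ===== PORT B =====
-- itertools.groupby: consecutive runs with their key
def pvGroupRuns : List String → List (Bool × List String)
  | [] => []
  | l :: ls =>
      match pvGroupRuns ls with
      | [] => [(pvKey l, [l])]
      | (k, g) :: rest =>
          if pvKey l = k then (pvKey l, l :: g) :: rest
          else (pvKey l, [l]) :: (k, g) :: rest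

def split_nonempty_blocks_py_alt (lines : List String) : List (List String) :=
  (pvGroupRuns lines).filterMap (fun kg => if kg.1 then some kg.2 else none)

-- ===== PRECONDITION & SPEC =====
def Spec_split_nonempty_blocks_py (lines : List String) (out : List (List String)) : Prop := out = split_nonempty_blocks_py_alt lines
instance (lines : List String) (out : List (List String)) : Decidable (Spec_split_nonempty_blocks_py lines out) := by unfold Spec_split_nonempty_blocks_py; infer_instance

-- ===== CLAIM (what is proved, stated in full; the proofs are below) =====
def Claim_equal_split_nonempty_blocks_py : Prop := ∀ (lines : List String), Dom_split_nonempty_blocks_py lines → Spec_split_nonempty_blocks_py lines (split_nonempty_blocks_py lines)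

-- ===== LEMMAS AND PROOFS =====

-- the accumulated blocks are a prefix of the result
theorem pvLoopA_blocks (ls : List String) : ∀ blocks current,
    pvLoopA ls blocks current = blocks ++ pvLoopA ls [] current := by
  induction ls with
  | nil => intro blocks current; by_cases h : current = [] <;> simp [pvLoopA, h]
  | cons l ls ih =>
      intro blocks current
      by_cases hk : pvKey l
      · simp only [pvLoopA, hk, if_pos]
        exact ih blocks (current ++ [l])
      · have hk' : pvKey l = false := by simpa using hk
        by_cases hc : current = []
        · simp only [pvLoopA, hk', hc, Bool.false_eq_true, if_false]
          exact ih blocks []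
        · simp only [pvLoopA, hk', hc, Bool.false_eq_true, if_false]
          rw [ih (blocks ++ [current]) [], ih ([] ++ [current]) []]
          simp
  
-- groupRuns on a blank-key head: the filtered result is unchanged
theorem pvAlt_cons_false (l : String) (ls : List String) (h : pvKey l = false) :
    split_nonempty_blocks_py_alt (l :: ls) = split_nonempty_blocks_py_alt ls := by
  unfold split_nonempty_blocks_py_alt
  show ((match pvGroupRuns ls with
      | [] => [(pvKey l, [l])]
      | (k, g) :: rest =>
          if pvKey l = k then (pvKey l, l :: g) :: rest
          else (pvKey l, [l]) :: (k, g) :: rest).filterMap _) = _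
  cases hg : pvGroupRuns ls with
  | nil => simp [h]
  | cons kg rest =>
      obtain ⟨k, g⟩ := kg
      cases k <;> simp [h]

-- groupRuns of a nonempty list starts with the head's key
theorem pvGroupRuns_head (l : String) (ls : List String) :
    ∃ g rest, pvGroupRuns (l :: ls) = (pvKey l, g) :: rest := by
  show (∃ g rest, (match pvGroupRuns ls with
      | [] => [(pvKey l, [l])]
      | (k, g) :: rest =>
          if pvKey l = k then (pvKey l, l :: g) :: rest
          else (pvKey l, [l]) :: (k, g) :: rest) = (pvKey l, g) :: rest)
  cases hg : pvGroupRuns ls with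
  | nil => exact ⟨[l], [], rfl⟩
  | cons kg rest =>
      obtain ⟨k, g⟩ := kg
      by_cases hk : pvKey l = k
      · exact ⟨l :: g, rest, by simp [hk]⟩
      · exact ⟨[l], (k, g) :: rest, by simp [hk]⟩

-- groupRuns on a non-blank head: merge with the leading non-blank run
theorem pvAlt_cons_true : ∀ (ls : List String) (l : String), pvKey l = true →
    split_nonempty_blocks_py_alt (l :: ls) =
      (l :: ls.takeWhile pvKey) :: split_nonempty_blocks_py_alt (ls.dropWhile pvKey) := by
  intro ls
  induction ls with
  | nil => intro l h; simp [split_nonempty_blocks_py_alt, pvGroupRuns, h]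
  | cons l' ls' ih =>
      intro l h
      by_cases hk : pvKey l'
      · have ih' := ih l' hk
        obtain ⟨g, rest, hg⟩ := pvGroupRuns_head l' ls'
        unfold split_nonempty_blocks_py_alt at ih' ⊢
        rw [hg] at ih'
        simp only [hk, List.filterMap_cons, if_pos] at ih'
        show ((match pvGroupRuns (l' :: ls') with
            | [] => [(pvKey l, [l])]
            | (k, g) :: rest =>
                if pvKey l = k then (pvKey l, l :: g) :: rest
                else (pvKey l, [l]) :: (k, g) :: rest).filterMap _) = _
        rw [hg]
        simp only [h, hk, if_pos, List.filterMap_cons, List.takeWhile_cons, List.dropWhile_cons]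
        simp only [List.cons.injEq] at ih'
        simp [ih'.1, ih'.2]
      · have hk' : pvKey l' = false := by simpa using hk
        obtain ⟨g, rest, hg⟩ := pvGroupRuns_head l' ls'
        unfold split_nonempty_blocks_py_alt
        show ((match pvGroupRuns (l' :: ls') with
            | [] => [(pvKey l, [l])]
            | (k, g) :: rest =>
                if pvKey l = k then (pvKey l, l :: g) :: rest
                else (pvKey l, [l]) :: (k, g) :: rest).filterMap _) = _
        rw [hg, hk']
        simp only [if_false, List.filterMap_cons, h, hk',
          Bool.false_eq_true, List.takeWhile_cons, List.dropWhile_cons, hg]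
        simp

-- the loop with a nonempty pending buffer: it absorbs the leading non-blank run
theorem pvLoopA_pending : ∀ (ls : List String) (current : List String), current ≠ [] →
    pvLoopA ls [] current =
      (current ++ ls.takeWhile pvKey) :: pvLoopA (ls.dropWhile pvKey) [] [] := by
  intro ls
  induction ls with
  | nil => intro current hc; simp [pvLoopA, hc]
  | cons l ls ih =>
      intro current hc
      by_cases hk : pvKey l
      · simp only [pvLoopA, hk, if_pos, List.takeWhile_cons, List.dropWhile_cons]
        rw [ih (current ++ [l]) (by simp)]
        simp
      · have hk' : pvKey l = false := by simpa using hk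
        simp only [pvLoopA, hk', List.takeWhile_cons, List.dropWhile_cons,
          Bool.false_eq_true, if_false, if_neg hc]
        rw [pvLoopA_blocks ls ([] ++ [current]) []]
        simp

-- main equivalence, by strong induction on length
theorem pvMain : ∀ (n : ℕ) (ls : List String), ls.length ≤ n →
    pvLoopA ls [] [] = split_nonempty_blocks_py_alt ls := by
  intro n
  induction n with
  | zero =>
      intro ls h
      have : ls = [] := List.eq_nil_of_length_eq_zero (Nat.le_zero.mp h)
      simp [this, pvLoopA, split_nonempty_blocks_py_alt, pvGroupRuns]
  | succ n ih =>
      intro ls h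
      cases ls with
      | nil => simp [pvLoopA, split_nonempty_blocks_py_alt, pvGroupRuns]
      | cons l ls =>
          by_cases hk : pvKey l
          · rw [pvAlt_cons_true ls l hk]
            simp only [pvLoopA, hk, if_pos, List.nil_append]
            rw [pvLoopA_pending ls [l] (by simp)]
            have hlen : (ls.dropWhile pvKey).length ≤ n := by
              have := List.length_dropWhile_le pvKey ls
              simp at h; omega
            rw [ih _ hlen]
            simp
          · have hk' : pvKey l = false := by simpa using hk
            rw [pvAlt_cons_false l ls hk']
            simp only [pvLoopA, hk', Bool.false_eq_true, if_false]
            exact ih ls (by simp at h; omega)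

-- ===== VERDICT (by name: the statement is the Claim_ definition above) =====
theorem split_nonempty_blocks_py_spec : Claim_equal_split_nonempty_blocks_py := by
  intro lines _
  unfold Spec_split_nonempty_blocks_py split_nonempty_blocks_py
  exact pvMain lines.length lines le_rfl
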